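-- pv_equiv track=rewrite | github.com/Levy-Naibei/algorithm-challenges | codesignal/sort_heights.py | sort_height
-- ===== SOURCE A (Python) =====
-- def sort_height(heights):
--     sorted_height = []
--     for height in heights:
--         if height != -1:
--             sorted_height.append(height)
--
--     ordered_height = sorted(sorted_height)
--
--     h=0
--     for i in range(len(heights)):
--         # ensure that only people are considered for rearrangement
--         if heights[i] != -1:
--             heights[i] = ordered_height[h]
--             h += 1
--
--     return heights
-- ===== SOURCE B (Python) =====
-- def sort_height(heights):
--     # In-place selection sort that skips the -1 (tree) positions: no values are
--     # extracted, sorted or scattered back; the list is rearranged purely by swaps.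
--     n = len(heights)
--     for i in range(n):
--         if heights[i] != -1:
--             m = i
--             for j in range(i + 1, n):
--                 if heights[j] != -1 and heights[j] < heights[m]:
--                     m = j
--             heights[i], heights[m] = heights[m], heights[i]
--     return heights
-- ===== Notes on version B (the rewrite author's own statement) =====
-- stated objective: alternative
-- what changed: Replaces A's extract-sort-scatter pipeline (filter values out, call sorted(), write them back with a running counter) by an in-place selection sort over the non -1 positions that rearranges the list purely by swaps, never building an auxiliary value list or calling sorted().
import Mathlib
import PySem

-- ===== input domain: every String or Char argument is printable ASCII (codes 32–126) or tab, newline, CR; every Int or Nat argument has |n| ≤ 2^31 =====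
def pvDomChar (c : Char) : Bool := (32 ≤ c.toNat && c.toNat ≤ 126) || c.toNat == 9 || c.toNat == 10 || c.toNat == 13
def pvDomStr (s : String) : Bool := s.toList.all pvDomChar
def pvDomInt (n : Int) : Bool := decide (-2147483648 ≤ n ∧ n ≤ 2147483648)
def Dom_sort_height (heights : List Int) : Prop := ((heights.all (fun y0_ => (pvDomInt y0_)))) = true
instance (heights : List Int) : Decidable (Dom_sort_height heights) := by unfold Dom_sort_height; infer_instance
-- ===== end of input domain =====

-- B replaces A's extract/sorted()/scatter pipeline by an in-place selection sort by
-- swaps over the non -1 positions (alternative algorithm, same return value); both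
-- Pythons mutate the argument list, the equivalence proved is about the return value.

-- ===== PORT A =====
def sort_height (heights : List Int) : List Int :=
  let sorted_height := heights.foldl
    (fun acc height => if height ≠ -1 then acc ++ [height] else acc) []
  let ordered_height := PySem.List.sorted sorted_height (fun x => x) false
  ((PySem.List.pyRange 0 (heights.length : Int) 1).foldl
    (fun (st : List Int × Int) i =>
      if PySem.List.pyGetD st.1 i 0 ≠ -1 then
        (PySem.List.pySetD st.1 i (PySem.List.pyGetD ordered_height st.2 0), st.2 + 1)
      else st) (heights, (0 : Int))).1

-- ===== PORT B =====
def sort_height_alt (heights : List Int) : List Int :=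
  let n := heights.length
  (PySem.List.pyRange 0 (n : Int) 1).foldl
    (fun hs i =>
      if PySem.List.pyGetD hs i 0 ≠ -1 then
        let m := (PySem.List.pyRange (i + 1) (n : Int) 1).foldl
          (fun m j =>
            if PySem.List.pyGetD hs j 0 ≠ -1 ∧ PySem.List.pyGetD hs j 0 < PySem.List.pyGetD hs m 0
            then j else m) i
        PySem.List.pySetD (PySem.List.pySetD hs i (PySem.List.pyGetD hs m 0)) m
          (PySem.List.pyGetD hs i 0)
      else hs)
    heights

-- ===== PRECONDITION & SPEC =====
def Spec_sort_height (heights : List Int) (out : List Int) : Prop := out = sort_height_alt heights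
instance (heights : List Int) (out : List Int) : Decidable (Spec_sort_height heights out) := by unfold Spec_sort_height; infer_instance

-- ===== CLAIM (what is proved, stated in full; the proofs are below) =====
def Claim_equal_sort_height : Prop := ∀ (heights : List Int), Dom_sort_height heights → Spec_sort_height heights (sort_height heights)

-- ===== LEMMAS AND PROOFS =====

/-- The common result shape: keep -1 entries, fill the others from `vs` left to right. -/
def pvMerge : List Int → List Int → List Int
  | [], _ => []
  | x :: t, vs =>
    if x = -1 then -1 :: pvMerge t vs
    else vs.headD 0 :: pvMerge t vs.tail

/-- The body of B's outer loop, named so the proofs can talk about it. -/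
def pvStep (n : Nat) (hs : List Int) (i : Int) : List Int :=
  if PySem.List.pyGetD hs i 0 ≠ -1 then
    let m := (PySem.List.pyRange (i + 1) (n : Int) 1).foldl
      (fun m j =>
        if PySem.List.pyGetD hs j 0 ≠ -1 ∧ PySem.List.pyGetD hs j 0 < PySem.List.pyGetD hs m 0
        then j else m) i
    PySem.List.pySetD (PySem.List.pySetD hs i (PySem.List.pyGetD hs m 0)) m
      (PySem.List.pyGetD hs i 0)
  else hs

theorem pv_alt_eq (heights : List Int) :
    sort_height_alt heights =
      (PySem.List.pyRange 0 (heights.length : Int) 1).foldl (pvStep heights.length) heights := rfl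

theorem pv_set_len (pre : List Int) (x v : Int) (t : List Int) :
    (pre ++ x :: t).set pre.length v = pre ++ v :: t := by
  induction pre with
  | nil => rfl
  | cons a p ih => simp [ih]

theorem pv_getD_len (pre : List Int) (x d : Int) (t : List Int) :
    (pre ++ x :: t).getD pre.length d = x := by
  induction pre with
  | nil => rfl
  | cons a p ih => simpa using ih

theorem pv_getD_add (pre l : List Int) (k : Nat) (d : Int) :
    (pre ++ l).getD (pre.length + k) d = l.getD k d := by
  induction pre with
  | nil => simp
  | cons a p ih => simpa [Nat.succ_add] using ih

theorem pv_set_add (pre l : List Int) (k : Nat) (v : Int) :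
    (pre ++ l).set (pre.length + k) v = pre ++ l.set k v := by
  rw [List.set_append]
  simp

theorem pv_scatterA (ord : List Int) :
    ∀ (xs pre vs0 vs : List Int), ord = vs0 ++ vs →
    xs.countP (fun h => h ≠ -1) ≤ vs.length →
    ((PySem.List.pyRange (pre.length : Int) ((pre.length : Int) + xs.length) 1).foldl
      (fun (st : List Int × Int) i =>
        if PySem.List.pyGetD st.1 i 0 ≠ -1 then
          (PySem.List.pySetD st.1 i (PySem.List.pyGetD ord st.2 0), st.2 + 1)
        else st) (pre ++ xs, (vs0.length : Int))).1 = pre ++ pvMerge xs vs := by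
  intro xs
  induction xs with
  | nil =>
    intro pre vs0 vs _ _
    simp [PySem.List.pyRange_one_eq_nil, pvMerge]
  | cons x t ih =>
    intro pre vs0 vs hord hc
    rw [PySem.List.pyRange_one_cons (by simp only [List.length_cons]; push_cast; omega)]
    simp only [List.foldl_cons]
    have hget : PySem.List.pyGetD (pre ++ x :: t) (pre.length : Int) 0 = x := by
      rw [PySem.List.pyGetD_natCast]; exact pv_getD_len pre x 0 t
    by_cases hx : x = -1
    · subst hx
      rw [if_neg (by simp [hget])]
      have h1 : ((pre.length : Int) + (((-1 : Int) :: t).length : Int)) =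
          ((pre ++ [(-1 : Int)]).length : Int) + (t.length : Int) := by
        simp; ring
      have h2 : pre ++ (-1 : Int) :: t = (pre ++ [(-1 : Int)]) ++ t := by simp
      have h3 : ((pre.length : Int) + 1) = ((pre ++ [(-1 : Int)]).length : Int) := by
        simp
      rw [h1, h2, h3, ih (pre ++ [(-1 : Int)]) vs0 vs hord
        (by simpa [List.countP_cons] using hc)]
      simp [pvMerge]
    · rw [if_pos (by simp [hget, hx])]
      have hcn : t.countP (fun h => h ≠ -1) + 1 ≤ vs.length := by
        simpa [List.countP_cons, hx] using hc
      obtain ⟨v, vt, rfl⟩ : ∃ v vt, vs = v :: vt := by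
        cases vs with
        | nil => simp at hcn
        | cons v vt => exact ⟨v, vt, rfl⟩
      have hgo : PySem.List.pyGetD ord (vs0.length : Int) 0 = v := by
        rw [PySem.List.pyGetD_natCast, hord]
        induction vs0 with
        | nil => rfl
        | cons a p ihp => simpa using ihp
      have hset : PySem.List.pySetD (pre ++ x :: t) (pre.length : Int)
          (PySem.List.pyGetD ord (vs0.length : Int) 0) = (pre ++ [v]) ++ t := by
        rw [hgo, PySem.List.pySetD_natCast, pv_set_len]; simp
      rw [hset]
      have h1 : ((pre.length : Int) + ((x :: t).length : Int)) =
          (((pre ++ [v]).length : Int)) + (t.length : Int) := by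
        simp; ring
      have h3 : ((pre.length : Int) + 1) = ((pre ++ [v]).length : Int) := by simp
      have h4 : ((vs0.length : Int) + 1) = ((vs0 ++ [v]).length : Int) := by simp
      rw [h1, h3, h4, ih (pre ++ [v]) (vs0 ++ [v]) vt (by simp [hord]) (by simp only [List.length_cons] at hcn; omega)]
      simp [pvMerge, hx]

/-- B's inner loop finds a non -1 position whose value is minimal among the
initial candidate and all non -1 positions of the scanned range. -/
theorem pv_inner_spec (hs : List Int) :
    ∀ (c j0 m : Nat), j0 + c = hs.length → m < j0 → hs.getD m 0 ≠ -1 →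
    ∃ M : Nat,
      (PySem.List.pyRange (j0 : Int) (hs.length : Int) 1).foldl
        (fun m j =>
          if PySem.List.pyGetD hs j 0 ≠ -1 ∧ PySem.List.pyGetD hs j 0 < PySem.List.pyGetD hs m 0
          then j else m) (m : Int) = (M : Int)
      ∧ M < hs.length ∧ hs.getD M 0 ≠ -1 ∧ (M = m ∨ j0 ≤ M)
      ∧ hs.getD M 0 ≤ hs.getD m 0
      ∧ ∀ j, j0 ≤ j → j < hs.length → hs.getD j 0 ≠ -1 → hs.getD M 0 ≤ hs.getD j 0 := by
  intro c
  induction c with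
  | zero =>
    intro j0 m h0 hm hne
    refine ⟨m, ?_, by omega, hne, Or.inl rfl, le_refl _,
      fun j h1 h2 _ => absurd h2 (by omega)⟩
    rw [PySem.List.pyRange_one_eq_nil (by omega)]
    rfl
  | succ c ih =>
    intro j0 m h0 hm hne
    have hlt : j0 < hs.length := by omega
    rw [PySem.List.pyRange_one_cons (by exact_mod_cast hlt)]
    simp only [List.foldl_cons, PySem.List.pyGetD_natCast]
    have hcast : ((j0 : Int) + 1) = ((j0 + 1 : Nat) : Int) := by push_cast; ring
    by_cases hcond : hs.getD j0 0 ≠ -1 ∧ hs.getD j0 0 < hs.getD m 0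
    · rw [if_pos hcond, hcast]
      obtain ⟨M, hEq, hMlt, hMne, hMor, hMle, hMmin⟩ :=
        ih (j0 + 1) j0 (by omega) (by omega) hcond.1
      refine ⟨M, hEq, hMlt, hMne, Or.inr (by omega), le_trans hMle (le_of_lt hcond.2), ?_⟩
      intro j hj1 hj2 hj3
      rcases Nat.eq_or_lt_of_le hj1 with h | h
      · rw [← h]; exact hMle
      · exact hMmin j (by omega) hj2 hj3
    · rw [if_neg hcond, hcast]
      obtain ⟨M, hEq, hMlt, hMne, hMor, hMle, hMmin⟩ :=
        ih (j0 + 1) m (by omega) (by omega) hne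
      refine ⟨M, hEq, hMlt, hMne, by omega, hMle, ?_⟩
      intro j hj1 hj2 hj3
      rcases Nat.eq_or_lt_of_le hj1 with h | h
      · rw [← h] at hj3 ⊢
        have hge : hs.getD m 0 ≤ hs.getD j0 0 := by
          by_contra hlt
          exact hcond ⟨hj3, by omega⟩
        exact le_trans hMle hge
      · exact hMmin j (by omega) hj2 hj3

/-- Naming the sorted order: if `w` is below every element of `l'` and `w :: l'`
is a rearrangement of `l`, then `sorted l` is `w` followed by `sorted l'`. -/
theorem pv_sorted_min_cons (l l' : List Int) (w : Int)
    (hperm : (w :: l').Perm l) (hmin : ∀ y ∈ l', w ≤ y) :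
    PySem.List.sorted l (fun x => x) false = w :: PySem.List.sorted l' (fun x => x) false := by
  apply PySem.List.sorted_id_eq_of_perm_of_pairwise
  · exact ((PySem.List.sorted_perm l' (fun x => x) false).cons w).trans hperm
  · rw [List.pairwise_cons]
    exact ⟨fun y hy => hmin y ((PySem.List.mem_sorted l' (fun x => x) false y).1 hy),
      PySem.List.sorted_pairwise l' (fun x => x)⟩

/-- `pvMerge` only looks at the -1 mask: overwriting a non -1 slot with a
non -1 value does not change it. -/
theorem pvMerge_set (t : List Int) :
    ∀ (k : Nat) (x : Int) (vs : List Int), k < t.length → t.getD k 0 ≠ -1 → x ≠ -1 →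
    pvMerge (t.set k x) vs = pvMerge t vs := by
  induction t with
  | nil => intro k x vs hk; simp at hk
  | cons a t2 ih =>
    intro k x vs hk ha hx
    cases k with
    | zero => simp only [List.getD_cons_zero] at ha; simp [pvMerge, ha, hx]
    | succ k =>
      simp only [List.getD_cons_succ] at ha
      by_cases haa : a = -1
      · simp [pvMerge, haa, ih k x vs (by simpa using hk) ha hx]
      · simp [pvMerge, haa, ih k x (vs.tail) (by simpa using hk) ha hx]

/-- Swapping `x` into a non -1 slot holding `w`: `w :: filter (t.set k x)` is a
rearrangement of `filter (x :: t)`. -/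
theorem pv_swap_perm (t : List Int) :
    ∀ (k : Nat) (x : Int), k < t.length → t.getD k 0 ≠ -1 → x ≠ -1 →
    (t.getD k 0 :: (t.set k x).filter (fun h => h ≠ -1)).Perm
      ((x :: t).filter (fun h => h ≠ -1)) := by
  induction t with
  | nil => intro k x hk; simp at hk
  | cons a t2 ih =>
    intro k x hk ha hx
    cases k with
    | zero =>
      simp only [List.getD_cons_zero] at ha ⊢
      simp only [List.set_cons_zero, List.filter_cons, decide_not]
      simp [ha, hx, List.Perm.swap]
    | succ k =>
      simp only [List.getD_cons_succ] at ha ⊢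
      have hk2 : k < t2.length := by simpa using hk
      have base := ih k x hk2 ha hx
      by_cases haa : a = -1
      · simpa [List.filter_cons, haa, hx] using base
      · -- a survives the filter on both sides
        have base' : (t2.getD k 0 :: (t2.set k x).filter (fun h => h ≠ -1)).Perm
            (x :: t2.filter (fun h => h ≠ -1)) := by
          simpa [List.filter_cons, hx] using base
        have e1 : (a :: t2.set k x).filter (fun h => h ≠ -1)
            = a :: (t2.set k x).filter (fun h => h ≠ -1) := by simp [haa]
        have e2 : (x :: a :: t2).filter (fun h => h ≠ -1)
            = x :: a :: t2.filter (fun h => h ≠ -1) := by simp [haa, hx]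
        simp only [List.set_cons_succ]
        rw [e1, e2]
        exact (List.Perm.swap a _ _).trans ((base'.cons a).trans (List.Perm.swap x a _))

/-- B's outer loop, characterised: once `pre` is finalised, running the loop over
the suffix sorts it in the pvMerge sense. -/
theorem pv_outerB (n : Nat) :
    ∀ (c : Nat) (suf pre : List Int), suf.length = c → n = pre.length + suf.length →
    (PySem.List.pyRange (pre.length : Int) (n : Int) 1).foldl (pvStep n) (pre ++ suf)
      = pre ++ pvMerge suf (PySem.List.sorted (suf.filter (fun h => h ≠ -1)) (fun x => x) false) := by
  intro c
  induction c with
  | zero =>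
    intro suf pre hc hn
    rw [List.eq_nil_of_length_eq_zero hc] at *
    rw [PySem.List.pyRange_one_eq_nil (by omega)]
    simp [pvMerge]
  | succ c ih =>
    intro suf pre hc hn
    obtain ⟨x, t, rfl⟩ : ∃ x t, suf = x :: t := by
      cases suf with
      | nil => simp at hc
      | cons x t => exact ⟨x, t, rfl⟩
    simp only [List.length_cons] at hc hn
    rw [PySem.List.pyRange_one_cons (by omega)]
    simp only [List.foldl_cons]
    have hget : PySem.List.pyGetD (pre ++ x :: t) (pre.length : Int) 0 = x := by
      rw [PySem.List.pyGetD_natCast]; exact pv_getD_len pre x 0 t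
    by_cases hx : x = -1
    · subst hx
      rw [show pvStep n (pre ++ (-1 : Int) :: t) (pre.length : Int) = pre ++ (-1 : Int) :: t by
        unfold pvStep; rw [if_neg (by simp [hget])]]
      have h2 : pre ++ (-1 : Int) :: t = (pre ++ [(-1 : Int)]) ++ t := by simp
      have h3 : ((pre.length : Int) + 1) = (((pre ++ [(-1 : Int)]).length : Nat) : Int) := by simp
      rw [h2, h3, ih t (pre ++ [(-1 : Int)]) (by omega) (by simp; omega)]
      simp [pvMerge]
    · -- selection step
      obtain ⟨M, hEq, hMlt, hMne, hMor, hMle, hMmin⟩ :=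
        pv_inner_spec (pre ++ x :: t) t.length (pre.length + 1) pre.length
          (by simp; omega) (by omega) (by rw [pv_getD_len]; exact hx)
      have hlen : (pre ++ x :: t).length = n := by simp; omega
      set w := (pre ++ x :: t).getD M 0 with hw
      have hMle' : w ≤ x := by rwa [pv_getD_len] at hMle
      have hmin_t : ∀ y ∈ t, y ≠ -1 → w ≤ y := by
        intro y hy hyne
        obtain ⟨j, hj, rfl⟩ := List.getElem_of_mem hy
        have hidx : (pre ++ x :: t).getD (pre.length + (1 + j)) 0 = t[j] := by
          rw [pv_getD_add, Nat.add_comm 1 j]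
          simp [List.getElem?_eq_getElem hj]
        have := hMmin (pre.length + (1 + j)) (by omega) (by simp; omega)
          (by rw [hidx]; exact hyne)
        rwa [hidx] at this
      have hstep : pvStep n (pre ++ x :: t) (pre.length : Int)
          = ((pre ++ x :: t).set pre.length w).set M x := by
        unfold pvStep
        rw [if_pos (by simp [hget, hx])]
        have e1 : ((pre.length : Int) + 1) = (((pre.length + 1 : Nat)) : Int) := by push_cast; ring
        have e2 : ((n : Nat) : Int) = (((pre ++ x :: t).length : Nat) : Int) := by rw [hlen]
        rw [e1, e2, hEq]
        simp [hget, hw]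
      rcases hMor with hM | hM
      · -- the minimum is already in front: the swap is a no-op
        have hwx : w = x := by rw [hw, hM, pv_getD_len]
        rw [hstep, hM, hwx, pv_set_len, pv_set_len]
        have h2 : pre ++ x :: t = (pre ++ [x]) ++ t := by simp
        have h3 : ((pre.length : Int) + 1) = (((pre ++ [x]).length : Nat) : Int) := by simp
        rw [h2, h3, ih t (pre ++ [x]) (by omega) (by simp; omega)]
        have hsort : PySem.List.sorted ((x :: t).filter (fun h => h ≠ -1)) (fun x => x) false
            = x :: PySem.List.sorted (t.filter (fun h => h ≠ -1)) (fun x => x) false := by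
          apply pv_sorted_min_cons
          · simp [hx]
          · intro y hy
            rw [List.mem_filter] at hy
            have := hmin_t y hy.1 (by simpa using hy.2)
            rwa [hwx] at this
        rw [hsort]
        simp [pvMerge, hx]
      · -- genuine swap with position M = pre.length + 1 + k inside t
        obtain ⟨k, rfl⟩ : ∃ k, M = pre.length + 1 + k := ⟨M - pre.length - 1, by omega⟩
        have hk : k < t.length := by rw [hlen] at hMlt; omega
        have htk : t.getD k 0 = w := by
          rw [hw, show pre.length + 1 + k = pre.length + (1 + k) by ring, pv_getD_add,
            Nat.add_comm 1 k]
          simp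
        have htkne : t.getD k 0 ≠ -1 := by rw [htk]; exact hMne
        have hset1 : (pre ++ x :: t).set pre.length w = pre ++ w :: t := pv_set_len ..
        have hset2 : (pre ++ w :: t).set (pre.length + 1 + k) x = (pre ++ [w]) ++ t.set k x := by
          rw [show pre ++ w :: t = (pre ++ [w]) ++ t by simp,
            show pre.length + 1 + k = (pre ++ [w]).length + k by simp, pv_set_add]
        rw [hstep, hset1, hset2]
        have h3 : ((pre.length : Int) + 1) = (((pre ++ [w]).length : Nat) : Int) := by simp
        rw [h3, ih (t.set k x) (pre ++ [w]) (by simp; omega) (by simp; omega)]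
        have hsort : PySem.List.sorted ((x :: t).filter (fun h => h ≠ -1)) (fun x => x) false
            = w :: PySem.List.sorted ((t.set k x).filter (fun h => h ≠ -1)) (fun x => x) false := by
          apply pv_sorted_min_cons
          · have := pv_swap_perm t k x hk htkne hx
            rwa [htk] at this
          · intro y hy
            rw [List.mem_filter] at hy
            rcases List.mem_or_eq_of_mem_set hy.1 with h | h
            · exact hmin_t y h (by simpa using hy.2)
            · rw [h]; exact hMle'
        rw [hsort, pvMerge_set t k x _ hk htkne hx]
        simp [pvMerge, hx]

-- ===== VERDICT (by name: the statement is the Claim_ definition above) =====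
theorem sort_height_spec : Claim_equal_sort_height := by
  intro heights _
  have hcount : heights.countP (fun h => h ≠ -1) ≤
      (PySem.List.sorted (heights.filter (fun h => h ≠ -1)) (fun x => x) false).length := by
    simp [PySem.List.length_sorted, List.countP_eq_length_filter]
  have hA := pv_scatterA
      (PySem.List.sorted (heights.filter (fun h => h ≠ -1)) (fun x => x) false)
      heights [] [] _ rfl hcount
  have hB := pv_outerB heights.length heights.length heights [] rfl (by simp)
  have hfil := PySem.List.foldl_append_ite_eq_filter (fun h => h ≠ -1) heights ([] : List Int)
  simp only [List.nil_append, List.length_nil, Nat.cast_zero, zero_add] at hA hB hfil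
  unfold Spec_sort_height
  show sort_height heights = sort_height_alt heights
  rw [pv_alt_eq]
  simp only [sort_height]
  rw [hfil, hA, hB]
  rfl
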